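-- pv_equiv track=rewrite | github.com/hchautran/DetectVul | be/utils.py | findComments
-- ===== SOURCE A (Python) =====
-- def findComments(sourcecode):
--   commentareas = []
--
--   inacomment = False
--   commentstart = -1
--   commentend = -1
--
--
--   for pos in range(len(sourcecode)):
--     if sourcecode[pos] == "#":
--       if not inacomment:
--         commentstart = pos
--         inacomment = True
--
--     if sourcecode[pos] == "\n":
--       if inacomment:
--         commentend = pos
--         inacomment = False
--
--     if commentstart >= 0 and commentend >= 0:
--       t = [commentstart, commentend]
--       commentareas.append(t)
--       commentstart = -1
--       commentend = -1
--
--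
--   return commentareas
-- ===== SOURCE B (Python) =====
-- def findComments(sourcecode):
--   # Jump-scan with str.find instead of a per-character state machine:
--   # locate the next '#', then its terminating '\n'; a '#'-run without a
--   # trailing newline (end of file) yields nothing, just like the original.
--   spans = []
--   pos = 0
--   while True:
--     i = sourcecode.find("#", pos)
--     if i == -1:
--       return spans
--     j = sourcecode.find("\n", i)
--     if j == -1:
--       return spans
--     spans.append([i, j])
--     pos = j + 1
-- ===== Notes on version B (the rewrite author's own statement) =====
-- stated objective: faster
-- what changed: Replaced the per-character state machine (flag + two sentinel indices checked on every character) with a jump scan that uses str.find to hop directly to the next '#' and its terminating '\n'.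
import Mathlib
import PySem

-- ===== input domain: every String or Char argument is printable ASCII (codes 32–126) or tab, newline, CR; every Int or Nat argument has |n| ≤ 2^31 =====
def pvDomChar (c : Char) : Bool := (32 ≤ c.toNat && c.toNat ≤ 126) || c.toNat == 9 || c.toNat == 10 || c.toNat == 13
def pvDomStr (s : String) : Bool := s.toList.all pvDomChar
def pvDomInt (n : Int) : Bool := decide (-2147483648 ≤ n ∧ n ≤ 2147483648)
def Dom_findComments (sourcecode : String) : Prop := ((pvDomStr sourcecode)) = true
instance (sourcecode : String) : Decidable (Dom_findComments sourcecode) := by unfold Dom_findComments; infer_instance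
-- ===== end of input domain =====

-- B changes: str.find jump scan ('next #', then 'next \n') instead of A's per-character state machine; same spans.

-- ===== PORT A =====
-- one loop iteration of A: the three successive 'if's on sourcecode[pos]
def stepA (st : (List (List Int)) × Bool × Int × Int) (pc : Int × Char) :
    (List (List Int)) × Bool × Int × Int :=
  let acc := st.1
  let p1 := if pc.2 = '#' then (if st.2.1 = false then (true, pc.1) else (st.2.1, st.2.2.1))
            else (st.2.1, st.2.2.1)
  let p2 := if pc.2 = '\n' then (if p1.1 = true then (false, pc.1) else (p1.1, st.2.2.2))
            else (p1.1, st.2.2.2)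
  if 0 ≤ p1.2 ∧ 0 ≤ p2.2 then (acc ++ [[p1.2, p2.2]], p2.1, -1, -1)
  else (acc, p2.1, p1.2, p2.2)

-- 'for pos in range(len(sourcecode)): … sourcecode[pos] …' iterated as enumerate (exact: same indices and characters)
def findComments (sourcecode : String) : List (List Int) :=
  (List.foldl stepA ([], false, -1, -1) (PySem.List.enumerate sourcecode.toList 0)).1

-- ===== PORT B =====
-- two helper facts cited by goB's termination proof
theorem findFrom_of_len_lt (s sub : List Char) (p : Nat) (h : s.length < p) :
    PySem.Chars.findFrom s sub (p : Int) = -1 := by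
  simp only [PySem.Chars.findFrom]
  have : ((s.length : Int)) < (p : Int) := by exact_mod_cast h
  rw [if_pos]
  · omega

theorem lt_len_of_prefix_drop {c : Char} {cs : List Char} {k : Nat}
    (h : [c] <+: List.drop k cs) : k < cs.length := by
  by_contra hk
  rw [List.drop_eq_nil_of_le (by omega)] at h
  simpa using h.length_le

-- the 'while True' loop of Source B; s.find(sub, start) = PySem.Chars.findFrom s.toList sub start (PySem.Str.findFrom_eq)
def goB (cs : List Char) (pos : Nat) : List (List Int) :=
  let i := PySem.Chars.findFrom cs ['#'] (pos : Int)
  if hi : i = -1 then []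
  else
    let j := PySem.Chars.findFrom cs ['\n'] i
    if hj : j = -1 then []
    else [i, j] :: goB cs (j.toNat + 1)
  termination_by cs.length - pos
  decreasing_by
    have h1 : pos ≤ cs.length := by
      by_contra h
      exact hi (findFrom_of_len_lt cs ['#'] pos (by omega))
    have h2 := PySem.Chars.findFrom_natCast_spec cs ['#'] pos h1 hi
    have hlt : (PySem.Chars.findFrom cs ['#'] (pos : Int)).toNat < cs.length :=
      lt_len_of_prefix_drop h2.2.1
    have hi0 : (0:Int) ≤ PySem.Chars.findFrom cs ['#'] (pos : Int) :=
      le_trans (by exact_mod_cast Nat.zero_le pos) h2.1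
    have hj' : PySem.Chars.findFrom cs ['\n']
        (((PySem.Chars.findFrom cs ['#'] (pos : Int)).toNat : Nat) : Int) ≠ -1 := by
      rw [Int.toNat_of_nonneg hi0]; exact hj
    have h3 := PySem.Chars.findFrom_natCast_spec cs ['\n'] _ (le_of_lt hlt) hj'
    have hjlt : (PySem.Chars.findFrom cs ['\n']
        ((PySem.Chars.findFrom cs ['#'] (pos : Int)).toNat : Int)).toNat < cs.length :=
      lt_len_of_prefix_drop h3.2.1
    have h4 := h3.1
    have h5 := h2.1
    rw [Int.toNat_of_nonneg hi0] at h4 hjlt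
    omega

def findComments_alt (sourcecode : String) : List (List Int) :=
  goB sourcecode.toList 0

-- ===== PRECONDITION & SPEC =====
def Spec_findComments (sourcecode : String) (out : List (List Int)) : Prop := out = findComments_alt sourcecode
instance (sourcecode : String) (out : List (List Int)) : Decidable (Spec_findComments sourcecode out) := by unfold Spec_findComments; infer_instance

-- ===== CLAIM (what is proved, stated in full; the proofs are below) =====
def Claim_equal_findComments : Prop := ∀ (sourcecode : String), Dom_findComments sourcecode → Spec_findComments sourcecode (findComments sourcecode)

-- ===== LEMMAS AND PROOFS =====

-- refM none = "outside a comment", refM (some s0) = "inside a comment started at s0"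
def refM : Option Nat → List Char → Nat → List (List Int)
  | _, [], _ => []
  | none, c :: t, n => if c = '#' then refM (some n) t (n+1) else refM none t (n+1)
  | some s0, c :: t, n =>
      if c = '\n' then [(s0 : Int), (n : Int)] :: refM none t (n+1)
      else refM (some s0) t (n+1)

-- A's fold equals the reference machine, from either machine state
theorem foldA_eq_refM (l : List Char) : ∀ (n : Nat) (acc : List (List Int)),
    ((List.foldl stepA (acc, false, -1, -1) (PySem.List.enumerate l (n : Int))).1
      = acc ++ refM none l n)
    ∧ ∀ s0 : Nat,
      ((List.foldl stepA (acc, true, (s0 : Int), -1) (PySem.List.enumerate l (n : Int))).1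
        = acc ++ refM (some s0) l n) := by
  induction l with
  | nil => intro n acc; simp [PySem.List.enumerate_nil, refM]
  | cons c t ih =>
    intro n acc
    constructor
    · rw [PySem.List.enumerate_cons, List.foldl_cons]
      by_cases hc : c = '#'
      · have hs : stepA (acc, false, -1, -1) ((n : Int), c) = (acc, true, (n : Int), -1) := by
          simp [stepA, hc]
        rw [hs]
        have h2 := (ih (n+1) acc).2 n
        rw [show (((n+1 : Nat)) : Int) = (n : Int) + 1 by push_cast; ring] at h2
        rw [h2, refM, if_pos hc]
      · have hs : stepA (acc, false, -1, -1) ((n : Int), c) = (acc, false, -1, -1) := by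
          by_cases hn : c = '\n' <;> simp [stepA, hc, hn]
        rw [hs]
        have h2 := (ih (n+1) acc).1
        rw [show (((n+1 : Nat)) : Int) = (n : Int) + 1 by push_cast; ring] at h2
        rw [h2, refM, if_neg hc]
    · intro s0
      rw [PySem.List.enumerate_cons, List.foldl_cons]
      by_cases hn : c = '\n'
      · have hs : stepA (acc, true, (s0 : Int), -1) ((n : Int), c)
            = (acc ++ [[(s0 : Int), (n : Int)]], false, -1, -1) := by
          simp [stepA, hn]
        rw [hs]
        have h2 := (ih (n+1) (acc ++ [[(s0 : Int), (n : Int)]])).1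
        rw [show (((n+1 : Nat)) : Int) = (n : Int) + 1 by push_cast; ring] at h2
        rw [h2, refM, if_pos hn, List.append_assoc]
        rfl
      · have hs : stepA (acc, true, (s0 : Int), -1) ((n : Int), c) = (acc, true, (s0 : Int), -1) := by
          by_cases hc : c = '#' <;> simp [stepA, hc, hn]
        rw [hs]
        have h2 := (ih (n+1) acc).2 s0
        rw [show (((n+1 : Nat)) : Int) = (n : Int) + 1 by push_cast; ring] at h2
        rw [h2, refM, if_neg hn]

-- '[c] starts at position m of cs' as an indexing fact
theorem singleton_prefix_drop {c : Char} {cs : List Char} {m : Nat} :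
    [c] <+: List.drop m cs ↔ cs[m]? = some c := by
  by_cases hm : m < cs.length
  · rw [List.drop_eq_getElem_cons hm, List.getElem?_eq_getElem hm]
    constructor
    · intro h
      exact congrArg some (List.cons_prefix_cons.mp h).1.symm
    · intro h
      rw [(Option.some.injEq _ _).mp h]
      exact ⟨_, rfl⟩
  · rw [List.drop_eq_nil_of_le (by omega), List.getElem?_eq_none (by omega)]
    constructor
    · intro h; simpa using h.length_le
    · intro h; simp at h

theorem refM_none_eq_nil {l : List Char} (h : '#' ∉ l) : ∀ n : Nat, refM none l n = [] := by
  induction l with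
  | nil => intro n; rfl
  | cons c t ih =>
    intro n
    rw [refM, if_neg (fun hc => h (by rw [hc]; exact List.mem_cons_self ..)),
      ih (fun ht => h (List.mem_cons_of_mem _ ht))]

theorem refM_some_eq_nil {l : List Char} (h : '\n' ∉ l) : ∀ (s0 n : Nat), refM (some s0) l n = [] := by
  induction l with
  | nil => intro s0 n; rfl
  | cons c t ih =>
    intro s0 n
    rw [refM, if_neg (fun hc => h (by rw [hc]; exact List.mem_cons_self ..)),
      ih (fun ht => h (List.mem_cons_of_mem _ ht))]

theorem refM_none_first {l : List Char} {k : Nat} (hc : l[k]? = some '#')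
    (hmin : ∀ j, j < k → l[j]? ≠ some '#') : ∀ n : Nat,
    refM none l n = refM (some (n + k)) (List.drop (k+1) l) (n + k + 1) := by
  induction l generalizing k with
  | nil => simp at hc
  | cons c t ih =>
    intro n
    cases k with
    | zero =>
      simp only [List.getElem?_cons_zero, Option.some.injEq] at hc
      rw [refM, if_pos hc]
      simp
    | succ k =>
      have hc0 : c ≠ '#' := by
        intro h
        exact hmin 0 (by omega) (by simp [h])
      rw [refM, if_neg hc0]
      have := ih (k := k) (by simpa using hc)
        (fun j hj => by simpa using hmin (j+1) (by omega)) (n+1)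
      rw [this]
      have harith : n + 1 + k = n + (k + 1) := by omega
      rw [harith]
      rfl

theorem refM_some_first {l : List Char} {k : Nat} (hc : l[k]? = some '\n')
    (hmin : ∀ j, j < k → l[j]? ≠ some '\n') : ∀ (s0 n : Nat),
    refM (some s0) l n
      = [(s0 : Int), ((n + k : Nat) : Int)] :: refM none (List.drop (k+1) l) (n + k + 1) := by
  induction l generalizing k with
  | nil => simp at hc
  | cons c t ih =>
    intro s0 n
    cases k with
    | zero =>
      simp only [List.getElem?_cons_zero, Option.some.injEq] at hc
      rw [refM, if_pos hc]
      simp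
    | succ k =>
      have hc0 : c ≠ '\n' := by
        intro h
        exact hmin 0 (by omega) (by simp [h])
      rw [refM, if_neg hc0]
      have := ih (k := k) (by simpa using hc)
        (fun j hj => by simpa using hmin (j+1) (by omega)) s0 (n+1)
      rw [this]
      have harith : n + 1 + k = n + (k + 1) := by omega
      rw [harith]
      rfl

-- B's jump scan equals the reference machine
theorem goB_eq_refM (cs : List Char) (pos : Nat) :
    goB cs pos = refM none (List.drop pos cs) pos := by
  suffices H : ∀ m pos, cs.length - pos < m → goB cs pos = refM none (List.drop pos cs) pos from
    H (cs.length + 1) pos (by omega)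
  intro m
  induction m with
  | zero => intro pos h; omega
  | succ m ih =>
    intro pos hm
    by_cases hi : PySem.Chars.findFrom cs ['#'] (pos : Int) = -1
    · rw [goB]
      simp only [dite_eq_ite]
      rw [if_pos hi]
      by_cases h1 : pos ≤ cs.length
      · have hni := (PySem.Chars.findFrom_natCast_eq_neg_one_iff cs ['#'] pos h1).mp hi
        have hmem : '#' ∉ List.drop pos cs := by
          intro hmem
          obtain ⟨s, t, hst⟩ := List.append_of_mem hmem
          exact hni ⟨s, t, by simpa using hst.symm⟩
        rw [refM_none_eq_nil hmem]
      · rw [List.drop_eq_nil_of_le (Nat.le_of_not_lt (by omega))]; rfl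
    · have h1 : pos ≤ cs.length := by
        by_contra h
        exact hi (findFrom_of_len_lt cs ['#'] pos (by omega))
      have h2 := PySem.Chars.findFrom_natCast_spec cs ['#'] pos h1 hi
      have hi0 : (0:Int) ≤ PySem.Chars.findFrom cs ['#'] (pos : Int) :=
        le_trans (by exact_mod_cast Nat.zero_le pos) h2.1
      set i0 : Nat := (PySem.Chars.findFrom cs ['#'] (pos : Int)).toNat with hi0def
      have hieq : PySem.Chars.findFrom cs ['#'] (pos : Int) = (i0 : Int) :=
        (Int.toNat_of_nonneg hi0).symm
      have higet : cs[i0]? = some '#' := singleton_prefix_drop.mp h2.2.1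
      have hilen : i0 < cs.length := by
        obtain ⟨h, -⟩ := List.getElem?_eq_some_iff.mp higet
        exact h
      have hposle : pos ≤ i0 := by
        have := h2.1; omega
      -- the machine skips from pos to the first '#', at index i0
      have hrefl : refM none (List.drop pos cs) pos
          = refM (some i0) (List.drop (i0+1) cs) (i0+1) := by
        have hstep := refM_none_first (l := List.drop pos cs) (k := i0 - pos)
          (by rw [List.getElem?_drop, show pos + (i0 - pos) = i0 by omega]; exact higet)
          (fun j hj => by
            rw [List.getElem?_drop]
            intro hgj
            exact h2.2.2 (pos + j) (by omega) (by omega) (singleton_prefix_drop.mpr hgj))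
          pos
        rw [hstep, List.drop_drop]
        rw [show pos + (i0 - pos) = i0 by omega, show pos + (i0 - pos + 1) = i0 + 1 by omega]
      by_cases hj : PySem.Chars.findFrom cs ['\n'] ((i0 : Nat) : Int) = -1
      · rw [goB]
        simp only [dite_eq_ite]
        rw [if_neg hi, hieq, if_pos hj, hrefl]
        have hnj := (PySem.Chars.findFrom_natCast_eq_neg_one_iff cs ['\n'] i0 (by omega)).mp hj
        have hmem : '\n' ∉ List.drop (i0+1) cs := by
          intro hmem
          have hmem' : '\n' ∈ List.drop i0 cs := by
            have hdd : List.drop (i0+1) cs = List.drop 1 (List.drop i0 cs) := by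
              rw [List.drop_drop]
            rw [hdd] at hmem
            exact List.mem_of_mem_drop hmem
          obtain ⟨s, t, hst⟩ := List.append_of_mem hmem'
          exact hnj ⟨s, t, by simpa using hst.symm⟩
        rw [refM_some_eq_nil hmem]
      · have h3 := PySem.Chars.findFrom_natCast_spec cs ['\n'] i0 (le_of_lt hilen) hj
        have hj0 : (0:Int) ≤ PySem.Chars.findFrom cs ['\n'] ((i0 : Nat) : Int) :=
          le_trans (by exact_mod_cast Nat.zero_le i0) h3.1
        set j0 : Nat := (PySem.Chars.findFrom cs ['\n'] ((i0 : Nat) : Int)).toNat with hj0def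
        have hjeq : PySem.Chars.findFrom cs ['\n'] ((i0 : Nat) : Int) = (j0 : Int) :=
          (Int.toNat_of_nonneg hj0).symm
        have hjget : cs[j0]? = some '\n' := singleton_prefix_drop.mp h3.2.1
        have hjlen : j0 < cs.length := by
          obtain ⟨h, -⟩ := List.getElem?_eq_some_iff.mp hjget
          exact h
        have hij : i0 < j0 := by
          rcases Nat.lt_or_ge i0 j0 with h | h
          · exact h
          · have hle : i0 ≤ j0 := by have := h3.1; omega
            have : i0 = j0 := by omega
            rw [this, hjget] at higet
            simp at higet
        rw [goB]
        simp only [dite_eq_ite]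
        rw [if_neg hi, hieq, if_neg hj, hjeq]
        rw [show ((j0 : Int)).toNat = j0 from Int.toNat_natCast j0]
        rw [ih (j0 + 1) (by omega), hrefl]
        have hstep2 := refM_some_first (l := List.drop (i0+1) cs) (k := j0 - (i0+1))
          (by rw [List.getElem?_drop, show i0 + 1 + (j0 - (i0+1)) = j0 by omega]; exact hjget)
          (fun j hj' => by
            rw [List.getElem?_drop]
            intro hgj
            exact h3.2.2 (i0 + 1 + j) (by omega) (by omega) (singleton_prefix_drop.mpr hgj))
          i0 (i0+1)
        rw [hstep2, List.drop_drop]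
        rw [show i0 + 1 + (j0 - (i0+1)) = j0 by omega,
          show i0 + 1 + (j0 - (i0 + 1) + 1) = j0 + 1 by omega]

-- ===== VERDICT (by name: the statement is the Claim_ definition above) =====
theorem findComments_spec : Claim_equal_findComments := by
  intro s _
  unfold Spec_findComments findComments findComments_alt
  rw [goB_eq_refM]
  simpa using (foldA_eq_refM s.toList 0 []).1
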